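-- pv_equiv track=rewrite | github.com/daniel-reich/turbo-robot | KHPFPaKpXmDeRoYQ3_12.py | check_score
-- ===== SOURCE A (Python) =====
-- def check_score(s):
--   myDict = {'#':5,'O':3,'X':1,'!':-1,'!!':-3,'!!!':-5}
--   myScore = 0
--   for a in range(len(s)):
--     for b in range(len(s[a])):
--       myScore += myDict[s[a][b]]
--   if myScore < 0:
--     return 0
--   return myScore
-- ===== SOURCE B (Python) =====
-- def check_score(s):
--     weights = {'#': 5, 'O': 3, 'X': 1, '!': -1, '!!': -3, '!!!': -5}
--     freq = {}
--     for row in s: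
--         for sym in row:
--             freq[sym] = freq.get(sym, 0) + 1
--     total = 0
--     for sym, count in freq.items():
--         total += weights[sym] * count
--     return total if total > 0 else 0
-- ===== Notes on version B (the rewrite author's own statement) =====
-- stated objective: alternative
-- what changed: B replaces A's per-element accumulation with a frequency-table pass over all symbols followed by a weighted sum over the distinct symbols; A's single running-score loop disappears.
import Mathlib
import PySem

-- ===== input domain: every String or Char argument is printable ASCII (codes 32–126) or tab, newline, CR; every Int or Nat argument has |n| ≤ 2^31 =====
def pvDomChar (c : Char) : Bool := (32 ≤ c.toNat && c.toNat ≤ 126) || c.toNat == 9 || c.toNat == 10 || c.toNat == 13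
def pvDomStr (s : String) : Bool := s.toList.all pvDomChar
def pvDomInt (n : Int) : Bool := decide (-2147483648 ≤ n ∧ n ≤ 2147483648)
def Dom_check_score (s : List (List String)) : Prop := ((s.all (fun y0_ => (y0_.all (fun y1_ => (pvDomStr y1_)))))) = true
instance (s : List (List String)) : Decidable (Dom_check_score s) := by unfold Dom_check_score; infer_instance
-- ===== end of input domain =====

-- B tallies a frequency table of all symbols, then takes a weighted sum over the distinct symbols
-- (alternative decomposition; same linear cost). Pre_ excludes inputs on which A raises KeyError.


-- the literal dict {'#':5,'O':3,'X':1,'!':-1,'!!':-3,'!!!':-5}, shared by both sources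
def pvWeights : PySem.Dict String Int :=
  PySem.Dict.ofList [("#", 5), ("O", 3), ("X", 1), ("!", -1), ("!!", -3), ("!!!", -5)]

-- ===== PORT A =====
-- myDict[x] raises KeyError on a key outside the dict; Pre_check_score excludes exactly those
-- inputs, so '.getD 0' after get? is exact on the admitted domain.
def check_score (s : List (List String)) : Int :=
  let myScore : Int :=
    (PySem.List.pyRange 0 s.length 1).foldl (fun sc a =>
      let row := PySem.List.pyGetD s a []
      (PySem.List.pyRange 0 row.length 1).foldl (fun sc b =>
        sc + ((pvWeights.get? (PySem.List.pyGetD row b "")).getD 0)) sc) 0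
  if myScore < 0 then 0 else myScore

-- ===== PORT B =====
-- freq[sym] = freq.get(sym, 0) + 1, then total += weights[sym] * count over freq.items()
def check_score_alt (s : List (List String)) : Int :=
  let freq : PySem.Dict String Int :=
    s.foldl (fun d row => row.foldl (fun d sym => d.insert sym (d.getD sym 0 + 1)) d)
      PySem.Dict.empty
  let total : Int :=
    freq.items.foldl (fun t p => t + ((pvWeights.get? p.1).getD 0) * p.2) 0
  if total > 0 then total else 0

-- ===== PRECONDITION & SPEC =====
-- Pre_ excludes exactly the inputs containing a symbol outside the score dict, on which the
-- Python A (and B) raises KeyError.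
def Pre_check_score (s : List (List String)) : Prop :=
  ∀ row ∈ s, ∀ sym ∈ row, sym ∈ ["#", "O", "X", "!", "!!", "!!!"]
instance (s : List (List String)) : Decidable (Pre_check_score s) := by
  unfold Pre_check_score; infer_instance

def pvWitness_check_score : List (List String) := [["#", "!", "O"], ["!!!"]]

def Spec_check_score (s : List (List String)) (out : Int) : Prop := out = check_score_alt s
instance (s : List (List String)) (out : Int) : Decidable (Spec_check_score s out) := by
  unfold Spec_check_score; infer_instance

-- ===== CLAIM (what is proved, stated in full; the proofs are below) =====
def Claim_equal_check_score : Prop :=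
  ∀ (s : List (List String)), Dom_check_score s → Pre_check_score s →
    Spec_check_score s (check_score s)

-- ===== LEMMAS AND PROOFS =====
def pvW (sym : String) : Int := (pvWeights.get? sym).getD 0

theorem pv_foldl_add_w (xs : List String) (a : Int) :
    xs.foldl (fun sc x => sc + pvW x) a = a + (xs.map pvW).sum := by
  induction xs generalizing a with
  | nil => simp
  | cons x xs ih => simp [List.foldl_cons, ih, add_assoc]

theorem pv_foldl_congr2 {α β : Type} (s : List α) (f g : β → α → β)
    (h : ∀ b a, f b a = g b a) : ∀ init, s.foldl f init = s.foldl g init := by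
  induction s with
  | nil => intro init; rfl
  | cons r rs ih => intro init; simp only [List.foldl_cons, h]; exact ih _

-- A's nested index loops compute the w-sum of the flattened symbol list
theorem pv_A_sum (s : List (List String)) :
    (PySem.List.pyRange 0 s.length 1).foldl (fun sc a =>
      let row := PySem.List.pyGetD s a []
      (PySem.List.pyRange 0 row.length 1).foldl (fun sc b =>
        sc + pvW (PySem.List.pyGetD row b "")) sc) 0
    = (s.flatten.map pvW).sum := by
  rw [PySem.List.foldl_pyRange_zero_pyGetD' s []
    (fun sc row => (PySem.List.pyRange 0 row.length 1).foldl
      (fun sc b => sc + pvW (PySem.List.pyGetD row b "")) sc) 0]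
  have h : ∀ (row : List String) (sc : Int),
      (PySem.List.pyRange 0 row.length 1).foldl
        (fun sc b => sc + pvW (PySem.List.pyGetD row b "")) sc
      = row.foldl (fun sc x => sc + pvW x) sc := fun row sc =>
    PySem.List.foldl_pyRange_zero_pyGetD' row "" (fun sc x => sc + pvW x) sc
  calc s.foldl (fun sc row => (PySem.List.pyRange 0 row.length 1).foldl
        (fun sc b => sc + pvW (PySem.List.pyGetD row b "")) sc) 0
      = s.foldl (fun sc row => row.foldl (fun sc x => sc + pvW x) sc) 0 := by
        exact pv_foldl_congr2 s _ _ (fun sc row => h row sc) 0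
    _ = s.flatten.foldl (fun sc x => sc + pvW x) 0 := List.foldl_flatten.symm
    _ = (s.flatten.map pvW).sum := by rw [pv_foldl_add_w]; simp

-- B's frequency dict is Counter(flatten s)
theorem pv_B_freq (s : List (List String)) :
    s.foldl (fun d row => row.foldl (fun d sym => d.insert sym (d.getD sym 0 + 1)) d)
      PySem.Dict.empty
    = PySem.Dict.counter s.flatten := by
  rw [← PySem.Dict.foldl_insert_getD_add_one_eq_counter, List.foldl_flatten]

theorem pv_foldl_add_pair (l : List (String × Int)) (a : Int) :
    l.foldl (fun t p => t + pvW p.1 * p.2) a = a + (l.map (fun p => pvW p.1 * p.2)).sum := by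
  induction l generalizing a with
  | nil => simp
  | cons p l ih => simp [List.foldl_cons, ih, add_assoc]

-- the weighted sum over distinct symbols equals the elementwise sum
theorem pv_counter_sum (xs : List String) :
    ((PySem.Set.ofList xs).map (fun k => pvW k * (xs.count k : Int))).sum
      = (xs.map pvW).sum := by
  have hnd : (PySem.Set.ofList xs).Nodup := PySem.Set.nodup_ofList xs
  have hfin : (PySem.Set.ofList xs).toFinset = xs.toFinset := by
    ext x; simp [PySem.Set.mem_ofList]
  rw [← List.sum_toFinset _ hnd, hfin, Finset.sum_list_map_count]
  apply Finset.sum_congr rfl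
  intro m _
  simp [pvW, mul_comm]

theorem pv_main (s : List (List String)) : check_score s = check_score_alt s := by
  unfold check_score check_score_alt
  rw [show (fun (sc : Int) (a : Int) =>
      let row := PySem.List.pyGetD s a []
      (PySem.List.pyRange 0 row.length 1).foldl (fun sc b =>
        sc + ((pvWeights.get? (PySem.List.pyGetD row b "")).getD 0)) sc)
    = (fun sc a =>
      let row := PySem.List.pyGetD s a []
      (PySem.List.pyRange 0 row.length 1).foldl (fun sc b =>
        sc + pvW (PySem.List.pyGetD row b "")) sc) from rfl]
  rw [pv_A_sum, pv_B_freq]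
  rw [show (fun (t : Int) (p : String × Int) =>
      t + ((pvWeights.get? p.1).getD 0) * p.2)
    = (fun t p => t + pvW p.1 * p.2) from rfl]
  dsimp only
  rw [PySem.Dict.items_counter, pv_foldl_add_pair]
  rw [show ((PySem.Set.ofList s.flatten).map (fun k => (k, (s.flatten.count k : Int)))).map
        (fun p => pvW p.1 * p.2)
      = (PySem.Set.ofList s.flatten).map (fun k => pvW k * (s.flatten.count k : Int)) from by
    rw [List.map_map]; rfl]
  rw [pv_counter_sum]
  set t := (s.flatten.map pvW).sum with ht
  rcases lt_trichotomy t 0 with h | h | h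
  · simp [h, not_lt.mpr h.le]
  · simp [h]
  · simp [h, not_lt.mpr h.le]

-- ===== VERDICT (by name: the statement is the Claim_ definition above) =====
theorem check_score_spec : Claim_equal_check_score := by
  intro s _ _
  unfold Spec_check_score
  exact pv_main s
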